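-- pv_equiv track=rewrite | github.com/SGSMarkNA/GENERAL_TOOLS | csv_utils.py | find_valid_data_row_ranges
-- ===== SOURCE A (Python) =====
-- def find_valid_data_row_ranges(csv):
-- 	ranges = []
-- 	current_row = 0
-- 	current_column = 0
-- 	range_start = [-1,-1]
-- 	range_end   = [-1,-1]
--
-- 	while current_row < len(csv):
-- 		if range_start[0] == -1 and range_start[1] == -1:
--
-- 			while current_column < len(csv[current_row]):
--
-- 				if not csv[current_row][current_column] ==  None:
-- 					range_start = [current_row,current_column]
-- 					break
-- 				else:
-- 					current_column += 1
--
-- 		if range_end[0] == -1 and range_end[1] == -1 and range_start[0] != -1 and range_start[1] != -1: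
--
-- 			while current_column < len(csv[current_row]):
--
-- 				if csv[current_row][current_column] ==  None and csv[current_row][0] ==  None:
-- 					range_end = [current_row,current_column]
-- 					ranges.append(range_start+range_end)
-- 					range_start = [-1,-1]
-- 					range_end   = [-1,-1]
--
-- 					break
-- 				current_column += 1
--
-- 			if range_start[0] != -1 and range_start[1] != -1:
-- 				range_end = [current_row,current_column]
-- 				ranges.append(range_start+range_end)
-- 				range_start = [-1,-1]
-- 				range_end   = [-1,-1]
--
-- 		current_row += 1
-- 		current_column = 0
-- 	return ranges
-- ===== SOURCE B (Python) =====
-- def _runs(row):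
--     # run-length encoding of the row's None-ness: list of [is_none, count]
--     runs = []
--     for cell in row:
--         is_none = cell == None
--         if runs and runs[-1][0] == is_none:
--             runs[-1][1] += 1
--         else:
--             runs.append([is_none, 1])
--     return runs
--
--
-- def find_valid_data_row_ranges(csv):
--     ranges = []
--     for r, row in enumerate(csv):
--         runs = _runs(row)
--         if not runs:
--             continue
--         if not runs[0][0]:
--             ranges.append([r, 0, r, len(row)])
--         elif len(runs) >= 2:
--             ranges.append([r, runs[0][1], r, runs[0][1] + runs[1][1]])
--     return ranges
-- ===== Notes on version B (the rewrite author's own statement) =====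
-- stated objective: alternative
-- what changed: Replaces A's cross-row sentinel state machine (shared current_column and range_start/range_end lists with reset logic and a post-loop append) by a staged computation: one pass run-length-encodes each row's None-pattern, then the range is read off the first two runs.
import Mathlib
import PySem

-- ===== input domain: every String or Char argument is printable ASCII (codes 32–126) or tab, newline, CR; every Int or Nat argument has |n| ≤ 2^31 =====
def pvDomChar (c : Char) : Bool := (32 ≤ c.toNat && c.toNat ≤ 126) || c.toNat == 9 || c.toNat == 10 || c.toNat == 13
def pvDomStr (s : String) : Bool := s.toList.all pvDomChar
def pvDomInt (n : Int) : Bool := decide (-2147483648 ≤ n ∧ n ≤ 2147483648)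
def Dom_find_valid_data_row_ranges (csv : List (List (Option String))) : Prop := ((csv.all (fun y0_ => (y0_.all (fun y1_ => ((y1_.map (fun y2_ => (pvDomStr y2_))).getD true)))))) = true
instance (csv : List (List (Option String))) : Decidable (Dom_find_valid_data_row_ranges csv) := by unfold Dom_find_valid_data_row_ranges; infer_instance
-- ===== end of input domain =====

-- B replaces A's cross-row sentinel state machine (while-loops sharing current_column and
-- range_start/range_end lists) by a staged computation: one pass run-length-encodes each row's
-- None-pattern, then the range is read off the first two runs; objective: simpler.

-- ===== PORT A =====
-- first inner while: scan from column c for a non-None cell; returns (range_start, current_column)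
def aScanStart (row : List (Option String)) (rs : Int × Int) (r c : Nat) : (Int × Int) × Nat :=
  if h : c < row.length then
    if ¬ (row.getD c none = none) then (((r : Int), (c : Int)), c)
    else aScanStart row rs r (c + 1)
  else (rs, c)
  termination_by row.length - c
  decreasing_by omega

-- second inner while: break position (if any) and final current_column.
-- row.getD 0 none is csv[current_row][0]: exact since the loop guard gives row ≠ [].
def aScanEnd (row : List (Option String)) (c : Nat) : Option Nat × Nat :=
  if h : c < row.length then
    if row.getD c none = none ∧ row.getD 0 none = none then (some c, c)
    else aScanEnd row (c + 1)
  else (none, c)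
  termination_by row.length - c
  decreasing_by omega

-- outer while over current_row, threading ranges / range_start / range_end exactly as A does
def aMain (csv : List (List (Option String))) (ranges : List (List Int)) (r : Nat)
    (rs re : Int × Int) : List (List Int) :=
  if h : r < csv.length then
    let row := csv.getD r []
    let p := if rs.1 = -1 ∧ rs.2 = -1 then aScanStart row rs r 0 else (rs, 0)
    let rs1 := p.1
    let c1 := p.2
    if re.1 = -1 ∧ re.2 = -1 ∧ rs1.1 ≠ -1 ∧ rs1.2 ≠ -1 then
      match aScanEnd row c1 with
      | (some e, _) =>
          aMain csv (ranges ++ [[rs1.1, rs1.2, (r : Int), (e : Int)]]) (r + 1) (-1, -1) (-1, -1)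
      | (none, c2) =>
          -- loop exhausted without break; the post-loop "if range_start != -1" fires (rs1 unchanged)
          aMain csv (ranges ++ [[rs1.1, rs1.2, (r : Int), (c2 : Int)]]) (r + 1) (-1, -1) (-1, -1)
    else
      aMain csv ranges (r + 1) rs1 re
  else ranges
  termination_by csv.length - r
  decreasing_by all_goals omega

def find_valid_data_row_ranges (csv : List (List (Option String))) : List (List Int) :=
  aMain csv [] 0 (-1, -1) (-1, -1)

-- ===== PORT B =====
-- _runs: run-length encoding of the row's None-pattern, built left to right
-- (runs[-1][1] += 1 becomes dropLast ++ [(f, n+1)])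
def bRuns (row : List (Option String)) : List (Bool × Nat) :=
  row.foldl (fun runs cell =>
    let isNone : Bool := decide (cell = none)
    match runs.getLast? with
    | some (f, n) => if f = isNone then runs.dropLast ++ [(f, n + 1)] else runs ++ [(isNone, 1)]
    | none => runs ++ [(isNone, 1)]) []

def find_valid_data_row_ranges_alt (csv : List (List (Option String))) : List (List Int) :=
  csv.zipIdx.foldl (fun ranges p =>
    let runs := bRuns p.1
    match runs with
    | [] => ranges
    | (f0, n0) :: rest =>
      if f0 = false then ranges ++ [[(p.2 : Int), 0, (p.2 : Int), (p.1.length : Int)]]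
      else
        match rest with
        | (_, n1) :: _ => ranges ++ [[(p.2 : Int), (n0 : Int), (p.2 : Int), ((n0 + n1 : Nat) : Int)]]
        | [] => ranges) []

-- ===== PRECONDITION & SPEC =====
def Spec_find_valid_data_row_ranges (csv : List (List (Option String))) (out : List (List Int)) : Prop := out = find_valid_data_row_ranges_alt csv
instance (csv : List (List (Option String))) (out : List (List Int)) : Decidable (Spec_find_valid_data_row_ranges csv out) := by unfold Spec_find_valid_data_row_ranges; infer_instance

-- ===== CLAIM (what is proved, stated in full; the proofs are below) =====
def Claim_equal_find_valid_data_row_ranges : Prop := ∀ (csv : List (List (Option String))), Dom_find_valid_data_row_ranges csv → Spec_find_valid_data_row_ranges csv (find_valid_data_row_ranges csv)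

-- ===== LEMMAS AND PROOFS =====

-- ---- common per-row specification (proof-side only) ----
def firstDataCol (row : List (Option String)) (i : Nat) : Option Nat :=
  if h : i < row.length then
    if ¬ (row.getD i none = none) then some i else firstDataCol row (i + 1)
  else none
  termination_by row.length - i
  decreasing_by omega

def firstNoneCol (row : List (Option String)) (i : Nat) : Nat :=
  if h : i < row.length then
    if row.getD i none = none then i else firstNoneCol row (i + 1)
  else row.length
  termination_by row.length - i
  decreasing_by omega

def rowOut (r : Nat) (row : List (Option String)) : List (List Int) :=
  match firstDataCol row 0 with
  | none => []
  | some s =>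
      [[(r : Int), (s : Int), (r : Int),
        (((if s = 0 then row.length else firstNoneCol row (s + 1)) : Nat) : Int)]]

def gRows : List (List (Option String)) → Nat → List (List Int)
  | [], _ => []
  | row :: t, n => rowOut n row ++ gRows t (n + 1)

-- ---- A-side characterisation ----
lemma scanStart_char (row : List (Option String)) (r : Nat) :
    ∀ c, c ≤ row.length → aScanStart row (-1, -1) r c =
      (match firstDataCol row c with
       | some s => (((r : Int), (s : Int)), s)
       | none => ((-1, -1), row.length)) := by
  intro c
  induction hn : row.length - c using Nat.strong_induction_on generalizing c with
  | _ n ih =>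
  intro hle
  rw [aScanStart, firstDataCol]
  by_cases h : c < row.length
  · simp only [dif_pos h]
    by_cases hne : row.getD c none = none
    · rw [if_neg (not_not_intro hne), if_neg (not_not_intro hne)]
      exact ih (row.length - (c + 1)) (by omega) (c + 1) rfl (by omega)
    · rw [if_pos hne, if_pos hne]
  · simp only [dif_neg h]
    have : c = row.length := by omega
    simp [this]

lemma firstDataCol_found (row : List (Option String)) :
    ∀ c s, firstDataCol row c = some s →
      c ≤ s ∧ s < row.length ∧ ¬ (row.getD s none = none) ∧
      (∀ j, c ≤ j → j < s → row.getD j none = none) := by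
  intro c
  induction hn : row.length - c using Nat.strong_induction_on generalizing c with
  | _ n ih =>
  intro s he
  rw [firstDataCol] at he
  by_cases h : c < row.length
  · rw [dif_pos h] at he
    by_cases hne : row.getD c none = none
    · rw [if_neg (not_not_intro hne)] at he
      obtain ⟨h1, h2, h3, h4⟩ := ih (row.length - (c + 1)) (by omega) (c + 1) rfl s he
      refine ⟨by omega, h2, h3, fun j hj1 hj2 => ?_⟩
      rcases Nat.eq_or_lt_of_le hj1 with rfl | hlt
      · exact hne
      · exact h4 j hlt hj2
    · rw [if_pos hne] at he
      injection he with he; subst he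
      exact ⟨le_refl _, h, hne, fun j h1 h2 => absurd (lt_of_le_of_lt h1 h2) (lt_irrefl _)⟩
  · rw [dif_neg h] at he; exact absurd he (by simp)

lemma scanEnd_nodata (row : List (Option String)) (h0 : ¬ (row.getD 0 none = none)) :
    ∀ c, c ≤ row.length → aScanEnd row c = (none, row.length) := by
  intro c
  induction hn : row.length - c using Nat.strong_induction_on generalizing c with
  | _ n ih =>
  intro hle
  rw [aScanEnd]
  by_cases h : c < row.length
  · rw [dif_pos h, if_neg (fun hc => h0 hc.2)]
    exact ih (row.length - (c + 1)) (by omega) (c + 1) rfl (by omega)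
  · rw [dif_neg h]
    have : c = row.length := by omega
    simp [this]

lemma scanEnd_char (row : List (Option String)) (h0 : row.getD 0 none = none) :
    ∀ c, c ≤ row.length →
      aScanEnd row c =
        (if firstNoneCol row c < row.length then
           (some (firstNoneCol row c), firstNoneCol row c)
         else (none, row.length)) := by
  intro c
  induction hn : row.length - c using Nat.strong_induction_on generalizing c with
  | _ n ih =>
  intro hle
  rw [aScanEnd, firstNoneCol]
  by_cases h : c < row.length
  · rw [dif_pos h, dif_pos h]
    by_cases hc : row.getD c none = none
    · rw [if_pos ⟨hc, h0⟩, if_pos hc, if_pos h]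
    · rw [if_neg (fun hx => hc hx.1), if_neg hc]
      exact ih (row.length - (c + 1)) (by omega) (c + 1) rfl (by omega)
  · rw [dif_neg h, dif_neg h]
    have : c = row.length := by omega
    simp [this]

lemma firstNoneCol_le (row : List (Option String)) :
    ∀ c, c ≤ row.length → firstNoneCol row c ≤ row.length := by
  intro c
  induction hn : row.length - c using Nat.strong_induction_on generalizing c with
  | _ n ih =>
  intro hle
  rw [firstNoneCol]
  by_cases h : c < row.length
  · rw [dif_pos h]
    by_cases hc : row.getD c none = none
    · rw [if_pos hc]; omega
    · rw [if_neg hc]; exact ih (row.length - (c + 1)) (by omega) (c + 1) rfl (by omega)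
  · rw [dif_neg h]

lemma aMain_eq (csv : List (List (Option String))) :
    ∀ r ranges, aMain csv ranges r (-1, -1) (-1, -1) = ranges ++ gRows (csv.drop r) r := by
  intro r
  induction hn : csv.length - r using Nat.strong_induction_on generalizing r with
  | _ n ih =>
  intro ranges
  rw [aMain]
  by_cases h : r < csv.length
  · set row : List (Option String) := csv.getD r [] with hrow
    have hdrop : csv.drop r = row :: csv.drop (r + 1) := by
      rw [hrow, List.getD, List.getElem?_eq_getElem h]
      simpa using (List.drop_eq_getElem_cons h).symm
    have hrec : ∀ rng : List (List Int),
        aMain csv rng (r + 1) (-1, -1) (-1, -1) = rng ++ gRows (csv.drop (r + 1)) (r + 1) :=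
      fun rng => ih (csv.length - (r + 1)) (by omega) (r + 1) rfl rng
    have hr : ¬ ((r : Int) = -1) := by omega
    cases hs : firstDataCol row 0 with
    | none =>
        simp only [dif_pos h, scanStart_char row r 0 (by omega), hs]
        norm_num
        rw [hrec ranges, hdrop]
        simp [gRows, rowOut, hs]
    | some s =>
        obtain ⟨_, hslen, hsdata, hprev⟩ := firstDataCol_found row 0 s hs
        have hr : ¬ ((r : Int) = -1) := by omega
        by_cases hz : s = 0
        · subst hz
          simp only [dif_pos h, scanStart_char row r 0 (by omega), hs]
          norm_num
          rw [if_neg hr, scanEnd_nodata row hsdata 0 (by omega)]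
          simp only [hrec, hdrop, gRows, rowOut, hs]
          simp
        · have h0 : row.getD 0 none = none := hprev 0 (by omega) (by omega)
          have hsne : ¬ ((s : Int) = -1) := by omega
          have hstep : aScanEnd row s = aScanEnd row (s + 1) := by
            rw [aScanEnd, dif_pos hslen, if_neg (fun hx => hsdata hx.1)]
          have hfle := firstNoneCol_le row (s + 1) (by omega)
          by_cases hlt : firstNoneCol row (s + 1) < row.length
          · simp only [dif_pos h, scanStart_char row r 0 (by omega), hs]
            norm_num
            rw [if_pos ⟨hr, hsne⟩, hstep, scanEnd_char row h0 (s + 1) (by omega), if_pos hlt]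
            simp only [hrec, hdrop, gRows, rowOut, hs, if_neg hz]
            simp
          · have hfeq : firstNoneCol row (s + 1) = row.length := by omega
            simp only [dif_pos h, scanStart_char row r 0 (by omega), hs]
            norm_num
            rw [if_pos ⟨hr, hsne⟩, hstep, scanEnd_char row h0 (s + 1) (by omega), if_neg hlt]
            simp only [hrec, hdrop, gRows, rowOut, hs, if_neg hz, hfeq]
            simp
  · rw [dif_neg h, List.drop_eq_nil_of_le (by omega)]
    simp [gRows]

-- ---- B-side characterisation: bRuns is the left-to-right RLE ----
def rleL : List Bool → List (Bool × Nat)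
  | [] => []
  | b :: t => (b, ((b :: t).takeWhile (· == b)).length) :: rleL ((b :: t).dropWhile (· == b))
  termination_by l => l.length
  decreasing_by
    have h1 := List.length_dropWhile_le (· == b) t
    simp only [List.dropWhile_cons, beq_self_eq_true, if_true, List.length_cons]
    omega

lemma rleL_nil : rleL [] = [] := by rw [rleL]

lemma rleL_cons (b : Bool) (t : List Bool) :
    rleL (b :: t) = (b, ((b :: t).takeWhile (· == b)).length) :: rleL ((b :: t).dropWhile (· == b)) := by
  rw [rleL]

def rleStep (runs : List (Bool × Nat)) (b : Bool) : List (Bool × Nat) :=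
  match runs.getLast? with
  | some (f, n) => if f = b then runs.dropLast ++ [(f, n + 1)] else runs ++ [(b, 1)]
  | none => runs ++ [(b, 1)]

lemma rleStep_cons (x : Bool × Nat) (L : List (Bool × Nat)) (b : Bool) (hL : L ≠ []) :
    rleStep (x :: L) b = x :: rleStep L b := by
  cases L with
  | nil => exact absurd rfl hL
  | cons y ys =>
    unfold rleStep
    rw [List.getLast?_cons_cons]
    cases hg : (y :: ys).getLast? with
    | none => simp at hg
    | some fn =>
      cases fn with
      | mk f n =>
        by_cases hfb : f = b
        · simp [hfb, List.dropLast_cons₂]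
        · simp [hfb]

lemma helper_all (p : Bool → Bool) (t u : List Bool) (ht : t.dropWhile p = []) :
    (t ++ u).takeWhile p = t ++ u.takeWhile p ∧ (t ++ u).dropWhile p = u.dropWhile p := by
  induction t with
  | nil => simp
  | cons a t ih =>
    rw [List.dropWhile_cons] at ht
    by_cases hp : p a = true
    · rw [if_pos hp] at ht
      obtain ⟨h1, h2⟩ := ih ht
      constructor
      · simp [List.takeWhile_cons, hp, h1]
      · simp [List.dropWhile_cons, hp, h2]
    · rw [if_neg hp] at ht; simp at ht

lemma helper_stop (p : Bool → Bool) (t u : List Bool) (d : Bool) (t' : List Bool)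
    (ht : t.dropWhile p = d :: t') :
    (t ++ u).takeWhile p = t.takeWhile p ∧ (t ++ u).dropWhile p = (d :: t') ++ u := by
  induction t with
  | nil =>
    simp only [List.dropWhile_nil] at ht
    exact absurd ht (by simp)
  | cons a t ih =>
    rw [List.dropWhile_cons] at ht
    by_cases hp : p a = true
    · rw [if_pos hp] at ht
      obtain ⟨h1, h2⟩ := ih ht
      constructor
      · simp [List.takeWhile_cons, hp, h1]
      · simp [List.dropWhile_cons, hp, h2]
    · rw [if_neg hp] at ht
      injection ht with h1 h2; subst h1; subst h2
      constructor
      · simp [List.takeWhile_cons, hp]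
      · simp [List.dropWhile_cons, hp]

lemma rleL_ne_nil (l : List Bool) (h : l ≠ []) : rleL l ≠ [] := by
  cases l with
  | nil => exact absurd rfl h
  | cons b t => rw [rleL_cons]; simp

lemma rleL_snoc (p : List Bool) (b : Bool) : rleL (p ++ [b]) = rleStep (rleL p) b := by
  induction hn : p.length using Nat.strong_induction_on generalizing p with
  | _ n ih =>
  cases p with
  | nil => simp [rleL_cons, rleL_nil, rleStep]
  | cons c t =>
    have hcc : (c == c) = true := beq_self_eq_true c
    have hsnoc : (c :: t) ++ [b] = c :: (t ++ [b]) := rfl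
    cases hdw : t.dropWhile (· == c) with
    | nil =>
      have htw : t.takeWhile (· == c) = t := by
        have := List.takeWhile_append_dropWhile (p := (· == c)) (l := t)
        rw [hdw, List.append_nil] at this; exact this
      obtain ⟨h1, h2⟩ := helper_all (· == c) t [b] hdw
      have hp : rleL (c :: t) = [(c, t.length + 1)] := by
        rw [rleL_cons]
        simp [List.takeWhile_cons, List.dropWhile_cons, hcc, htw, hdw, rleL_nil]
      by_cases hbc : b = c
      · subst hbc
        rw [hsnoc, rleL_cons, hp]
        simp [rleStep, List.takeWhile_cons, List.dropWhile_cons, h1, h2, htw, rleL_nil]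
        try omega
      · have hbc' : (b == c) = false := by simp [hbc]
        rw [hsnoc, rleL_cons, hp]
        simp [rleStep, List.takeWhile_cons, List.dropWhile_cons, h1, h2, htw, hbc',
          rleL_cons, rleL_nil, Ne.symm hbc]
        try omega
    | cons d t' =>
      obtain ⟨h1, h2⟩ := helper_stop (· == c) t [b] d t' hdw
      have hlen : (d :: t').length ≤ t.length := by
        have := List.length_dropWhile_le (· == c) t
        rw [hdw] at this; exact this
      have hih : rleL ((d :: t') ++ [b]) = rleStep (rleL (d :: t')) b :=
        ih (d :: t').length (by simp at hlen hn ⊢; omega) (d :: t') rfl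
      have hpeq : rleL (c :: t) = (c, (t.takeWhile (· == c)).length + 1) :: rleL (d :: t') := by
        rw [rleL_cons]
        simp [List.takeWhile_cons, List.dropWhile_cons, hcc, hdw, Nat.add_comm]
      rw [hsnoc, rleL_cons, hpeq,
        rleStep_cons _ _ _ (rleL_ne_nil _ (by simp)), ← hih]
      simp [List.takeWhile_cons, List.dropWhile_cons, h1, h2]
      try omega

lemma foldl_rleStep (bs : List Bool) :
    ∀ p, List.foldl rleStep (rleL p) bs = rleL (p ++ bs) := by
  induction bs with
  | nil => intro p; simp
  | cons b bs ih =>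
    intro p
    rw [List.foldl_cons, ← rleL_snoc, ih]
    simp

lemma bRuns_eq_rleL (row : List (Option String)) :
    bRuns row = rleL (row.map (fun c => decide (c = none))) := by
  have : bRuns row = List.foldl rleStep [] (row.map (fun c => decide (c = none))) := by
    rw [List.foldl_map]; rfl
  rw [this]
  have := foldl_rleStep (row.map (fun c => decide (c = none))) []
  rw [rleL_nil] at this
  simpa using this

-- ---- positional facts about takeWhile/dropWhile ----
lemma tw_pos (p : Bool → Bool) (l : List Bool) (j : Nat) (hj : j < (l.takeWhile p).length)
    (hjl : j < l.length) : p (l[j]) = true := by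
  have hsplit : l.takeWhile p ++ l.dropWhile p = l := List.takeWhile_append_dropWhile
  have h0 : l[j] = (l.takeWhile p ++ l.dropWhile p)[j]'(by rw [hsplit]; exact hjl) :=
    List.getElem_of_eq hsplit.symm hjl
  have h1 : (l.takeWhile p ++ l.dropWhile p)[j]'(by rw [hsplit]; exact hjl)
      = (l.takeWhile p)[j]'hj := List.getElem_append_left hj
  rw [h0, h1]
  exact List.mem_takeWhile_imp (List.getElem_mem hj)

lemma dw_eq_drop (p : Bool → Bool) (l : List Bool) :
    l.dropWhile p = l.drop ((l.takeWhile p).length) := by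
  have hsplit : l.takeWhile p ++ l.dropWhile p = l := List.takeWhile_append_dropWhile
  calc l.dropWhile p = (l.takeWhile p ++ l.dropWhile p).drop ((l.takeWhile p).length) :=
        List.drop_left.symm
    _ = l.drop ((l.takeWhile p).length) := by rw [hsplit]

lemma tw_head (p : Bool → Bool) (l : List Bool) (h : (l.takeWhile p).length < l.length) :
    p (l[(l.takeWhile p).length]) = false := by
  have hdw : l.dropWhile p ≠ [] := by
    intro hnil
    have hsplit : l.takeWhile p ++ l.dropWhile p = l := List.takeWhile_append_dropWhile
    rw [hnil, List.append_nil] at hsplit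
    rw [hsplit] at h; omega
  have hh := List.head_dropWhile_not p hdw
  have h0 : 0 < (l.dropWhile p).length := List.length_pos_of_ne_nil hdw
  have e := dw_eq_drop p l
  have h1 : (l.dropWhile p).head hdw = (l.dropWhile p)[0]'h0 := List.head_eq_getElem hdw
  have h2 : (l.dropWhile p)[0]'h0 = (l.drop ((l.takeWhile p).length))[0]'(by rw [← e]; exact h0) :=
    List.getElem_of_eq e h0
  have h3 : (l.drop ((l.takeWhile p).length))[0]'(by rw [← e]; exact h0)
      = l[(l.takeWhile p).length + 0]'(by omega) := List.getElem_drop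
  rw [h1, h2, h3] at hh
  simpa using hh

lemma tw_head' (p : Bool → Bool) (l : List Bool) (n : Nat) (hn : n = (l.takeWhile p).length)
    (h : n < l.length) : p (l[n]'h) = false := by
  subst hn; exact tw_head p l h

lemma getElem_idx_congr {α : Type} (l : List α) {i j : Nat} (hij : i = j) (hi : i < l.length) :
    l[i]'hi = l[j]'(hij ▸ hi) := by subst hij; rfl

-- ---- constructive characterisations of firstDataCol / firstNoneCol ----
lemma getD_eq_getElem (row : List (Option String)) (j : Nat) (h : j < row.length) :
    row.getD j none = row[j] := by
  rw [List.getD_eq_getElem?_getD, List.getElem?_eq_getElem h]; rfl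

lemma fdc_some (row : List (Option String)) (s : Nat) (hs : s < row.length)
    (hd : ¬ (row.getD s none = none)) (hall : ∀ j, j < s → row.getD j none = none) :
    ∀ c, c ≤ s → firstDataCol row c = some s := by
  intro c
  induction hn : s - c using Nat.strong_induction_on generalizing c with
  | _ n ih =>
  intro hcs
  rw [firstDataCol, dif_pos (by omega)]
  rcases Nat.eq_or_lt_of_le hcs with rfl | hlt
  · rw [if_pos hd]
  · rw [if_neg (not_not_intro (hall c hlt))]
    exact ih (s - (c + 1)) (by omega) (c + 1) rfl (by omega)

lemma fdc_none (row : List (Option String)) :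
    ∀ c, (∀ j, c ≤ j → j < row.length → row.getD j none = none) → firstDataCol row c = none := by
  intro c
  induction hn : row.length - c using Nat.strong_induction_on generalizing c with
  | _ n ih =>
  intro hall
  rw [firstDataCol]
  by_cases h : c < row.length
  · rw [dif_pos h, if_neg (not_not_intro (hall c (le_refl c) h))]
    exact ih (row.length - (c + 1)) (by omega) (c + 1) rfl (fun j h1 h2 => hall j (by omega) h2)
  · rw [dif_neg h]

lemma fnc_spec (row : List (Option String)) (e : Nat) (he : e ≤ row.length)
    (hat : e < row.length → row.getD e none = none) :
    ∀ c, c ≤ e → (∀ j, c ≤ j → j < e → ¬ (row.getD j none = none)) → firstNoneCol row c = e := by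
  intro c
  induction hn : e - c using Nat.strong_induction_on generalizing c with
  | _ n ih =>
  intro hce hdata
  rw [firstNoneCol]
  rcases Nat.eq_or_lt_of_le hce with rfl | hlt
  · by_cases h : c < row.length
    · rw [dif_pos h, if_pos (hat h)]
    · rw [dif_neg h]; omega
  · rw [dif_pos (by omega), if_neg (hdata c (le_refl c) hlt)]
    exact ih (e - (c + 1)) (by omega) (c + 1) rfl (by omega) (fun j h1 h2 => hdata j (by omega) h2)

-- ---- per-row equality of B's emission with rowOut ----
def bRow (r : Nat) (row : List (Option String)) : List (List Int) :=
  match bRuns row with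
  | [] => []
  | (f0, n0) :: rest =>
    if f0 = false then [[(r : Int), 0, (r : Int), (row.length : Int)]]
    else
      match rest with
      | (_, n1) :: _ => [[(r : Int), (n0 : Int), (r : Int), ((n0 + n1 : Nat) : Int)]]
      | [] => []

lemma bRow_eq_rowOut (r : Nat) (row : List (Option String)) : bRow r row = rowOut r row := by
  unfold bRow
  rw [bRuns_eq_rleL]
  set bs := row.map (fun c => decide (c = none)) with hbs
  have hlen : bs.length = row.length := by rw [hbs, List.length_map]
  have hget : ∀ j (h : j < row.length), bs[j]'(by omega) = decide (row[j] = none) := by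
    intro j h; simp [hbs]
  cases hb : bs with
  | nil =>
    have hrow : row = [] := by
      have := hlen; rw [hb] at this; simpa using (List.eq_nil_of_length_eq_zero this.symm).symm
    subst hrow
    simp [rleL_nil, rowOut, firstDataCol]
  | cons b0 t =>
    have hbs0 : bs ≠ [] := by rw [hb]; simp
    have hlen0 : 0 < row.length := by rw [← hlen, hb]; simp
    rw [← hb]
    have hrle : rleL bs = (b0, (bs.takeWhile (· == b0)).length) :: rleL (bs.dropWhile (· == b0)) := by
      conv_lhs => rw [hb, rleL_cons]
      rw [← hb]
    rw [hrle]
    have hb0 : bs[0]'(by omega) = b0 := by simp [hb]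
    by_cases hf : b0 = false
    · subst hf
      have h0 : ¬ (row.getD 0 none = none) := by
        rw [getD_eq_getElem row 0 hlen0]
        have := hget 0 hlen0
        rw [hb0] at this
        simpa using this.symm
      have hfdc0 : firstDataCol row 0 = some 0 :=
        fdc_some row 0 hlen0 h0 (fun j hj => absurd hj (by omega)) 0 (le_refl 0)
      simp [rowOut, hfdc0]
    · have hf' : b0 = true := by cases b0 <;> simp_all
      subst hf'
      set n0 := (bs.takeWhile (· == true)).length with hn0
      have htwle : n0 ≤ bs.length := by
        rw [hn0]
        have hsplit : bs.takeWhile (· == true) ++ bs.dropWhile (· == true) = bs :=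
          List.takeWhile_append_dropWhile
        calc (bs.takeWhile (· == true)).length ≤ (bs.takeWhile (· == true)).length + (bs.dropWhile (· == true)).length := by omega
        _ = bs.length := by rw [← List.length_append, hsplit]
      have hn0pos : 0 < n0 := by
        rw [hn0, hb, List.takeWhile_cons]
        simp
      have hprefnone : ∀ j, j < n0 → row.getD j none = none := by
        intro j hj
        have hjl : j < row.length := by omega
        have := tw_pos (· == true) bs j (by rw [← hn0]; exact hj) (by omega)
        rw [hget j hjl] at this
        rw [getD_eq_getElem row j hjl]
        simpa using this
      cases hdw : rleL (bs.dropWhile (· == true)) with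
      | nil =>
        have hdwnil : bs.dropWhile (· == true) = [] := by
          by_contra hne
          exact rleL_ne_nil _ hne hdw
        have hn0all : n0 = bs.length := by
          have hsplit : bs.takeWhile (· == true) ++ bs.dropWhile (· == true) = bs :=
            List.takeWhile_append_dropWhile
          rw [hdwnil, List.append_nil] at hsplit
          rw [hn0, hsplit]
        simp [rowOut, fdc_none row 0 (fun j _ hjl => hprefnone j (by omega))]
      | cons fn1 rest2 =>
        cases fn1 with
        | mk f1 n1 =>
        have hdwne : bs.dropWhile (· == true) ≠ [] := by
          intro hnil; rw [hnil] at hdw; rw [rleL_nil] at hdw; simp at hdw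
        have hn0lt : n0 < bs.length := by
          rcases Nat.lt_or_ge n0 bs.length with h | h
          · exact h
          · exfalso
            have : bs.dropWhile (· == true) = [] := by
              rw [dw_eq_drop, ← hn0]
              exact List.drop_eq_nil_of_le (by omega)
            exact hdwne this
        have hn0row : n0 < row.length := by omega
        have hatn0 : ¬ (row.getD n0 none = none) := by
          have := tw_head' (· == true) bs n0 hn0 (by omega)
          rw [hget n0 hn0row] at this
          rw [getD_eq_getElem row n0 hn0row]
          simpa using this
        have hfdc : firstDataCol row 0 = some n0 :=
          fdc_some row n0 hn0row hatn0 hprefnone 0 (by omega)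
        -- second run
        set dw := bs.dropWhile (· == true) with hdwdef
        have hdrop : dw = bs.drop n0 := by rw [hdwdef, dw_eq_drop, hn0]
        have hdwget : ∀ k (h : k < dw.length), dw[k]'h = bs[n0 + k]'(by
            rw [hdrop] at h; simp at h; omega) := by
          intro k h
          have h' : k < (bs.drop n0).length := by rw [← hdrop]; exact h
          calc dw[k]'h = (bs.drop n0)[k]'h' := List.getElem_of_eq hdrop h
            _ = bs[n0 + k]'(by simp at h'; omega) := List.getElem_drop
        cases hdwc : dw with
        | nil => exact absurd hdwc hdwne
        | cons d u =>
          have hd : d = false := by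
            have h0' : 0 < dw.length := List.length_pos_of_ne_nil hdwne
            have hd0 : dw[0]'h0' = d := by
              have := List.getElem_of_eq hdwc h0'
              simpa using this
            have hval : d = bs[n0]'hn0lt := by
              calc d = dw[0]'h0' := hd0.symm
                _ = bs[n0 + 0]'(by omega) := hdwget 0 h0'
                _ = bs[n0]'hn0lt := getElem_idx_congr bs (Nat.add_zero n0) (by omega)
            have h2 := tw_head' (· == true) bs n0 hn0 hn0lt
            rw [← hval] at h2
            simpa using h2
          have hrle2 : rleL dw = (d, (dw.takeWhile (· == d)).length) :: rleL (dw.dropWhile (· == d)) := by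
            conv_lhs => rw [hdwc, rleL_cons]
            rw [← hdwc]
          rw [hdwdef] at hdw
          rw [hrle2] at hdw
          injection hdw with hdw1 hdw2
          injection hdw1 with hdf hdn
          set n1' := (dw.takeWhile (· == d)).length with hn1
          have hn1pos : 0 < n1' := by
            rw [hn1, hdwc, List.takeWhile_cons]
            simp
          have hn1le : n1' ≤ dw.length := by
            have hsplit : dw.takeWhile (· == d) ++ dw.dropWhile (· == d) = dw :=
              List.takeWhile_append_dropWhile
            calc n1' ≤ n1' + (dw.dropWhile (· == d)).length := by omega
            _ = dw.length := by rw [hn1, ← List.length_append, hsplit]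
          have hdwlen : dw.length = bs.length - n0 := by rw [hdrop]; simp
          have hrun : ∀ j, n0 ≤ j → j < n0 + n1' → ¬ (row.getD j none = none) := by
            intro j hj1 hj2
            have hk : j - n0 < n1' := by omega
            have hkdw : j - n0 < dw.length := by omega
            have hjrow : j < row.length := by omega
            have hp := tw_pos (· == d) dw (j - n0) (by rw [← hn1]; exact hk) hkdw
            have hchain : dw[j - n0]'hkdw = bs[j]'(by omega) := by
              calc dw[j - n0]'hkdw = bs[n0 + (j - n0)]'(by omega) := hdwget _ hkdw
                _ = bs[j]'(by omega) := getElem_idx_congr bs (by omega) (by omega)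
            rw [hchain, hget j hjrow, hd] at hp
            rw [getD_eq_getElem row j hjrow]
            simpa using hp
          have hend : n0 + n1' < row.length → row.getD (n0 + n1') none = none := by
            intro hlt
            have hn1lt : n1' < dw.length := by omega
            have hp := tw_head' (· == d) dw n1' hn1 hn1lt
            have hchain : dw[n1']'hn1lt = bs[n0 + n1']'(by omega) := hdwget n1' hn1lt
            rw [hchain, hget (n0 + n1') (by omega), hd] at hp
            rw [getD_eq_getElem row (n0 + n1') (by omega)]
            simpa using hp
          have hfnc : firstNoneCol row (n0 + 1) = n0 + n1' :=
            fnc_spec row (n0 + n1') (by omega) hend (n0 + 1) (by omega)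
              (fun j hj1 hj2 => hrun j (by omega) hj2)
          have hne0 : n0 ≠ 0 := by omega
          simp [rowOut, hfdc, hfnc, hne0, ← hdn]
  
-- ---- fold over rows ----
lemma alt_fold (rows : List (List (Option String))) :
    ∀ (n : Nat) (acc : List (List Int)),
      (rows.zipIdx n |>.foldl
        (fun ranges p =>
          let runs := bRuns p.1
          match runs with
          | [] => ranges
          | (f0, n0) :: rest =>
            if f0 = false then ranges ++ [[(p.2 : Int), 0, (p.2 : Int), (p.1.length : Int)]]
            else
              match rest with
              | (_, n1) :: _ => ranges ++ [[(p.2 : Int), (n0 : Int), (p.2 : Int), ((n0 + n1 : Nat) : Int)]]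
              | [] => ranges) acc)
      = acc ++ gRows rows n := by
  induction rows with
  | nil => intro n acc; simp [gRows]
  | cons row t ih =>
    intro n acc
    rw [List.zipIdx_cons, List.foldl_cons, ih, gRows, ← bRow_eq_rowOut n row]
    unfold bRow
    cases hr : bRuns row with
    | nil => simp
    | cons fn rest =>
      cases fn with
      | mk f0 n0 =>
        by_cases hf : f0 = false
        · simp [hf]
        · cases rest with
          | nil => simp [hf]
          | cons fn1 rest2 => cases fn1; simp [hf]

-- ===== VERDICT (by name: the statement is the Claim_ definition above) =====
theorem find_valid_data_row_ranges_spec : Claim_equal_find_valid_data_row_ranges := by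
  intro csv _
  unfold Spec_find_valid_data_row_ranges find_valid_data_row_ranges find_valid_data_row_ranges_alt
  rw [aMain_eq csv 0 [], alt_fold csv 0 []]
  simp
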